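-- pv_equiv track=rewrite | github.com/aecwells/hwautomation | src/hwautomation/hardware/discovery/parsers/dmidecode.py | parse_bios_info
-- ===== SOURCE A (Python) =====
-- from typing import Any, Dict
--
-- def parse_bios_info(output: str) -> Dict[str, str]:
--     """Parse dmidecode BIOS output."""
--     bios_info = {}
--
--     for line in output.split("\n"):
--         line = line.strip()
--         if line.startswith("Version:"):
--             bios_info["version"] = line.split(":", 1)[1].strip()
--         elif line.startswith("Release Date:"):
--             bios_info["date"] = line.split(":", 1)[1].strip()
--
--     return bios_info
-- ===== SOURCE B (Python) =====
-- import re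
--
-- # One MULTILINE regex over the whole text instead of an explicit line loop:
-- # '^' anchors at each line start, '[ \t\r]*' allows leading whitespace (A strips it),
-- # the alternation picks the field name, '(.*)' captures the rest of the line.
-- # The dict comprehension reproduces dict overwrite semantics (first occurrence
-- # fixes the key's position, the last occurrence wins the value).
-- _FIELD_RE = re.compile(r"^[ \t\r]*(Version|Release Date):(.*)$", re.MULTILINE)
--
--
-- def parse_bios_info(output: str) -> dict:
--     """Parse dmidecode BIOS output."""
--     return {
--         ("version" if key == "Version" else "date"): value.strip()
--         for key, value in _FIELD_RE.findall(output)
--     }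
-- ===== Notes on version B (the rewrite author's own statement) =====
-- stated objective: idiomatic
-- what changed: Replaces the explicit line loop with per-line strip/startswith/split branches by a single compiled MULTILINE regex matched over the whole text plus a dict comprehension over its findall result.
import Mathlib
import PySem

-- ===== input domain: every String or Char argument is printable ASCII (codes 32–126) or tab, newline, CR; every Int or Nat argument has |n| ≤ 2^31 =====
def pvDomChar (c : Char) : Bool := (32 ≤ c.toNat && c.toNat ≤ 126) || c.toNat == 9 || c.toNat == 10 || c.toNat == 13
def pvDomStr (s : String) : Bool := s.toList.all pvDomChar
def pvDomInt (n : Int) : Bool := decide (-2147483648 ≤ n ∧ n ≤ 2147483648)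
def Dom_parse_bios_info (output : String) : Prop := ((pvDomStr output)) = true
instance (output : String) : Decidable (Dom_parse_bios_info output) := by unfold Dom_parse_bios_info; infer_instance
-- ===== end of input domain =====

-- B replaces A's explicit line loop by one MULTILINE regex pass over the whole text (idiomatic; same cost).

-- ===== PORT A =====
-- loop body of A: strip the line, then the Version:/Release Date: branches.
-- 'line.split(":", 1)[1]' is pyGetD with an unused default: inside either branch the
-- stripped line starts with the field prefix, so the split always has a second piece.
def pvStepA (bios_info : PySem.Dict String String) (line0 : String) : PySem.Dict String String :=
  let line := PySem.Str.strip line0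
  if PySem.Str.startswith line "Version:" then
    bios_info.insert "version"
      (PySem.Str.strip (PySem.List.pyGetD ((PySem.Str.splitMax? line ":" 1).getD []) 1 ""))
  else if PySem.Str.startswith line "Release Date:" then
    bios_info.insert "date"
      (PySem.Str.strip (PySem.List.pyGetD ((PySem.Str.splitMax? line ":" 1).getD []) 1 ""))
  else bios_info

-- 'output.split("\n")': split? is some because the separator "\n" is nonempty.
def parse_bios_info (output : String) : List (String × String) :=
  (((PySem.Str.split? output "\n").getD []).foldl pvStepA PySem.Dict.empty).items

-- ===== PORT B =====
def pvBlank (c : Char) : Bool := c == ' ' || c == '\t' || c == '\r'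

-- Hand port of _FIELD_RE.findall(output) for
-- _FIELD_RE = re.compile(r"^[ \t\r]*(Version|Release Date):(.*)$", re.MULTILINE).
-- Exact: with re.MULTILINE '^' matches exactly at the start of each '\n'-separated line,
-- no construct of the pattern can match '\n' (the class excludes it, '.'/'$' stop before it),
-- and the class chars cannot start either alternative, so matching is per line without
-- backtracking: skip the [ \t\r]* run, try 'Version' then 'Release Date', then the ':';
-- group 2 captures the rest of the line.
def pvFieldMatch (line : List Char) : Option (String × String) :=
  let t := line.dropWhile pvBlank
  if "Version:".toList.isPrefixOf t then some ("Version", String.ofList (t.drop 8))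
  else if "Release Date:".toList.isPrefixOf t then some ("Release Date", String.ofList (t.drop 13))
  else none

def pvFindall (output : String) : List (String × String) :=
  ((PySem.Str.split? output "\n").getD []).filterMap (fun ln => pvFieldMatch ln.toList)

-- one entry of the dict comprehension
def pvStepB (d : PySem.Dict String String) (kv : String × String) : PySem.Dict String String :=
  d.insert (if kv.1 == "Version" then "version" else "date") (PySem.Str.strip kv.2)

def parse_bios_info_alt (output : String) : List (String × String) :=
  ((pvFindall output).foldl pvStepB PySem.Dict.empty).items

-- ===== PRECONDITION & SPEC =====
def Spec_parse_bios_info (output : String) (out : List (String × String)) : Prop := out = parse_bios_info_alt output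
instance (output : String) (out : List (String × String)) : Decidable (Spec_parse_bios_info output out) := by unfold Spec_parse_bios_info; infer_instance

-- ===== CLAIM (what is proved, stated in full; the proofs are below) =====
def Claim_equal_parse_bios_info : Prop := ∀ (output : String), Dom_parse_bios_info output → Spec_parse_bios_info output (parse_bios_info output)

-- ===== LEMMAS AND PROOFS =====

-- forward-building reformulation of PySem.Chars.splitOn.go on the separator ['\n']
def pvLines (pre : List Char) : List Char → List (List Char)
  | [] => [pre]
  | c :: rest => if c = '\n' then pre :: pvLines [] rest else pvLines (pre ++ [c]) rest

theorem pvStepA_eq (d : PySem.Dict String String) (line0 : String) :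
    pvStepA d line0 =
      (if PySem.Str.startswith (PySem.Str.strip line0) "Version:" then
        d.insert "version"
          (PySem.Str.strip (PySem.List.pyGetD ((PySem.Str.splitMax? (PySem.Str.strip line0) ":" 1).getD []) 1 ""))
      else if PySem.Str.startswith (PySem.Str.strip line0) "Release Date:" then
        d.insert "date"
          (PySem.Str.strip (PySem.List.pyGetD ((PySem.Str.splitMax? (PySem.Str.strip line0) ":" 1).getD []) 1 ""))
      else d) := rfl

theorem pvFieldMatch_eq (line : List Char) :
    pvFieldMatch line =
      (if "Version:".toList.isPrefixOf (line.dropWhile pvBlank) then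
        some ("Version", String.ofList ((line.dropWhile pvBlank).drop 8))
      else if "Release Date:".toList.isPrefixOf (line.dropWhile pvBlank) then
        some ("Release Date", String.ofList ((line.dropWhile pvBlank).drop 13))
      else none) := rfl

theorem pv_dropWhile_congr_mem {α : Type} (p q : α → Bool) (l : List α)
    (h : ∀ x ∈ l, p x = q x) : l.dropWhile p = l.dropWhile q := by
  induction l with
  | nil => rfl
  | cons c l ih =>
    have hc := h c (by simp)
    simp only [List.dropWhile_cons, ← hc]
    split
    · exact ih (fun x hx => h x (by simp [hx]))
    · rfl

theorem pv_dropWhile_append_cons {α : Type} (q : α → Bool) (xs : List α) (y : α) (ys : List α)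
    (hy : q y = false) : List.dropWhile q (xs ++ y :: ys) = List.dropWhile q xs ++ y :: ys := by
  rw [List.dropWhile_append]
  split
  · rename_i he
    rw [List.isEmpty_iff] at he
    simp [he, hy]
  · rfl

theorem pv_dropWhile_head_false {α : Type} (p : α → Bool) (l : List α) (d : α) (m : List α)
    (h : l.dropWhile p = d :: m) : p d = false := by
  induction l with
  | nil => simp at h
  | cons c l ih =>
    by_cases hc : p c
    · exact ih (by simpa [List.dropWhile_cons, hc] using h)
    · simp only [List.dropWhile_cons, hc] at h
      simp_all

theorem pv_dropWhile_idem {α : Type} (p : α → Bool) (l : List α) :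
    (l.dropWhile p).dropWhile p = l.dropWhile p := by
  induction l with
  | nil => rfl
  | cons c l ih =>
    by_cases hc : p c <;> simp [hc, ih]

-- rstrip over a block ending in a non-space character
theorem pv_rstrip_append (p : List Char) (y : Char) (r : List Char)
    (hy : PySem.Chars.isspace y = false) :
    PySem.Chars.rstrip ((p ++ [y]) ++ r) = (p ++ [y]) ++ PySem.Chars.rstrip r := by
  simp only [PySem.Chars.rstrip, List.reverse_append, List.reverse_cons, List.reverse_nil,
    List.nil_append, List.append_assoc]
  rw [show r.reverse ++ ([y] ++ p.reverse) = r.reverse ++ y :: p.reverse by simp]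
  rw [pv_dropWhile_append_cons _ _ _ _ hy]
  simp

theorem pv_rstrip_prefix (x : List Char) : PySem.Chars.rstrip x <+: x := by
  have h : List.dropWhile PySem.Chars.isspace x.reverse <:+ x.reverse := List.dropWhile_suffix _
  have := List.reverse_prefix.mpr h
  simpa [PySem.Chars.rstrip] using this

theorem pv_lstrip_rstrip (r : List Char) :
    PySem.Chars.lstrip (PySem.Chars.rstrip r) = PySem.Chars.rstrip (PySem.Chars.lstrip r) := by
  rcases hl : PySem.Chars.lstrip r with _ | ⟨d, m⟩
  · have hall : ∀ x ∈ r, PySem.Chars.isspace x = true := by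
      rw [← List.dropWhile_eq_nil_iff (p := PySem.Chars.isspace)]
      exact hl
    have hrev : PySem.Chars.rstrip r = [] := by
      simp only [PySem.Chars.rstrip, List.reverse_eq_nil_iff]
      rw [List.dropWhile_eq_nil_iff]
      intro x hx
      exact hall x (by simpa using hx)
    rw [hrev]
    rfl
  · have hd : PySem.Chars.isspace d = false := pv_dropWhile_head_false _ _ _ _ hl
    have hsplit : r = r.takeWhile PySem.Chars.isspace ++ d :: m := by
      conv_lhs => rw [← List.takeWhile_append_dropWhile (p := PySem.Chars.isspace) (l := r)]
      rw [show List.dropWhile PySem.Chars.isspace r = d :: m from hl]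
    set pre := r.takeWhile PySem.Chars.isspace with hpre
    have hpres : ∀ x ∈ pre, PySem.Chars.isspace x = true := fun x hx => List.mem_takeWhile_imp hx
    have h1 : PySem.Chars.rstrip r = pre ++ d :: PySem.Chars.rstrip m := by
      rw [hsplit]
      have : pre ++ d :: m = (pre ++ [d]) ++ m := by simp
      rw [this, pv_rstrip_append _ _ _ hd]
      simp
    have h2 : ∀ z : List Char, PySem.Chars.lstrip (pre ++ d :: z) = d :: z := by
      intro z
      simp only [PySem.Chars.lstrip, List.dropWhile_append]
      rw [List.dropWhile_eq_nil_iff.mpr hpres]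
      simp [hd]
    have h3 : PySem.Chars.rstrip (d :: m) = d :: PySem.Chars.rstrip m := by
      have : (d : Char) :: m = ([] ++ [d]) ++ m := by simp
      rw [this, pv_rstrip_append _ _ _ hd]
      simp
    simp only [h1, h2, h3]

theorem pv_strip_rstrip (r : List Char) :
    PySem.Chars.strip (PySem.Chars.rstrip r) = PySem.Chars.strip r := by
  simp only [PySem.Chars.strip]
  rw [pv_lstrip_rstrip]
  simp only [PySem.Chars.rstrip, PySem.Chars.lstrip]
  rw [List.reverse_reverse, pv_dropWhile_idem]

-- splitOn.go on ['\n'] is pvLines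
theorem pv_splitOn_go (fuel : Nat) : ∀ (l cur : List Char) (acc : List (List Char)),
    l.length < fuel →
    PySem.Chars.splitOn.go ['\n'] fuel l cur acc = acc.reverse ++ pvLines cur.reverse l := by
  induction fuel with
  | zero => intro l cur acc h; omega
  | succ fuel ih =>
    intro l cur acc h
    match l with
    | [] => simp [PySem.Chars.splitOn.go, pvLines]
    | c :: rest =>
      by_cases hc : c = '\n'
      · subst hc
        rw [show PySem.Chars.splitOn.go ['\n'] (fuel + 1) ('\n' :: rest) cur acc
              = PySem.Chars.splitOn.go ['\n'] fuel rest [] (cur.reverse :: acc) by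
            simp [PySem.Chars.splitOn.go, List.isPrefixOf]]
        rw [ih rest [] (cur.reverse :: acc) (by simpa using Nat.lt_of_succ_lt_succ h)]
        simp [pvLines]
      · rw [show PySem.Chars.splitOn.go ['\n'] (fuel + 1) (c :: rest) cur acc
              = PySem.Chars.splitOn.go ['\n'] fuel rest (c :: cur) acc by
            simp [PySem.Chars.splitOn.go, List.isPrefixOf, Ne.symm hc]]
        rw [ih rest (c :: cur) acc (by simpa using Nat.lt_of_succ_lt_succ h)]
        simp [pvLines, hc]

theorem pv_splitOn_eq (s : List Char) :
    PySem.Chars.splitOn s ['\n'] = pvLines [] s := by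
  rw [PySem.Chars.splitOn, pv_splitOn_go (s.length + 1) s [] [] (by omega)]
  simp

theorem pv_pvLines_mem : ∀ (l pre p : List Char), p ∈ pvLines pre l →
    ∀ x ∈ p, x ∈ pre ∨ (x ∈ l ∧ x ≠ '\n') := by
  intro l
  induction l with
  | nil =>
    intro pre p hp x hx
    simp [pvLines] at hp
    subst hp
    exact Or.inl hx
  | cons c rest ih =>
    intro pre p hp x hx
    by_cases hc : c = '\n'
    · subst hc
      have hp' : p = pre ∨ p ∈ pvLines [] rest := by simpa [pvLines] using hp
      rcases hp' with rfl | hp'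
      · exact Or.inl hx
      · rcases ih [] p hp' x hx with h | ⟨h1, h2⟩
        · simp at h
        · exact Or.inr ⟨by simp [h1], h2⟩
    · have hp' : p ∈ pvLines (pre ++ [c]) rest := by simpa [pvLines, hc] using hp
      rcases ih (pre ++ [c]) p hp' x hx with h | ⟨h1, h2⟩
      · rcases List.mem_append.mp h with h | h
        · exact Or.inl h
        · simp only [List.mem_singleton] at h
          subst h
          exact Or.inr ⟨by simp, hc⟩
      · exact Or.inr ⟨by simp [h1], h2⟩

-- splitOnMax machinery for line.split(":", 1)
theorem pv_splitOnMax_go_mzero (fuel : Nat) (l cur : List Char) (acc : List (List Char)) :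
    PySem.Chars.splitOnMax.go [':'] fuel 0 l cur acc = ((cur.reverse ++ l) :: acc).reverse := by
  match fuel, l with
  | 0, l => simp [PySem.Chars.splitOnMax.go]
  | fuel + 1, [] => simp [PySem.Chars.splitOnMax.go]
  | fuel + 1, c :: rest => simp [PySem.Chars.splitOnMax.go]

theorem pv_splitOnMax_go_consume : ∀ (pfx : List Char), (∀ c ∈ pfx, c ≠ ':') →
    ∀ (fuel m : Nat) (l cur : List Char) (acc : List (List Char)), m ≠ 0 →
    PySem.Chars.splitOnMax.go [':'] (fuel + pfx.length) m (pfx ++ l) cur acc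
      = PySem.Chars.splitOnMax.go [':'] fuel m l (pfx.reverse ++ cur) acc := by
  intro pfx
  induction pfx with
  | nil => intro _ fuel m l cur acc _; simp
  | cons c pfx ih =>
    intro h fuel m l cur acc hm
    have hc : c ≠ ':' := h c (by simp)
    have hfl : fuel + (c :: pfx).length = (fuel + pfx.length) + 1 := by simp; omega
    rw [hfl]
    rw [show PySem.Chars.splitOnMax.go [':'] ((fuel + pfx.length) + 1) m ((c :: pfx) ++ l) cur acc
          = PySem.Chars.splitOnMax.go [':'] (fuel + pfx.length) m (pfx ++ l) (c :: cur) acc by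
        simp [PySem.Chars.splitOnMax.go, hm, List.isPrefixOf, Ne.symm hc]]
    rw [ih (fun x hx => h x (by simp [hx])) fuel m l (c :: cur) acc hm]
    simp

theorem pv_splitOnMax_colon (pfx r : List Char) (h : ∀ c ∈ pfx, c ≠ ':') :
    PySem.Chars.splitOnMax (pfx ++ ':' :: r) [':'] 1 = [pfx, r] := by
  rw [PySem.Chars.splitOnMax]
  norm_num
  rw [show pfx.length + (r.length + 1) + 1 = (r.length + 2) + pfx.length by omega]
  rw [pv_splitOnMax_go_consume pfx h (r.length + 2) 1 (':' :: r) [] [] (by omega)]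
  rw [show (r.length + 2) = (r.length + 1) + 1 from rfl]
  rw [show PySem.Chars.splitOnMax.go [':'] ((r.length + 1) + 1) 1 (':' :: r) (pfx.reverse ++ []) []
        = PySem.Chars.splitOnMax.go [':'] (r.length + 1) 0 r [] [(pfx.reverse ++ []).reverse] by
      simp [PySem.Chars.splitOnMax.go, List.isPrefixOf]]
  rw [pv_splitOnMax_go_mzero]
  simp

-- the value computed by A's branch equals B's stripped capture
theorem pv_value (name r : List Char) (hnc : ∀ c ∈ name, c ≠ ':') :
    PySem.Str.strip (PySem.List.pyGetD
      ((PySem.Str.splitMax? (String.ofList ((name ++ [':']) ++ PySem.Chars.rstrip r)) ":" 1).getD []) 1 "")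
    = PySem.Str.strip (String.ofList r) := by
  have hs : (name ++ [':']) ++ PySem.Chars.rstrip r = name ++ ':' :: PySem.Chars.rstrip r := by simp
  have h1 : PySem.Str.splitMax? (String.ofList ((name ++ [':']) ++ PySem.Chars.rstrip r)) ":" 1
      = some [String.ofList name, String.ofList (PySem.Chars.rstrip r)] := by
    rw [PySem.Str.splitMax?, PySem.Chars.splitMax?]
    simp only [String.toList_ofList]
    rw [show (":" : String).toList = [':'] from rfl]
    rw [hs, pv_splitOnMax_colon name _ hnc]
    rfl
  rw [h1, Option.getD_some]
  rw [show PySem.List.pyGetD [String.ofList name, String.ofList (PySem.Chars.rstrip r)] 1 ""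
        = String.ofList (PySem.Chars.rstrip r) from rfl]
  rw [show PySem.Str.strip (String.ofList (PySem.Chars.rstrip r))
        = String.ofList (PySem.Chars.strip (PySem.Chars.rstrip r)) from by
      rw [PySem.Str.strip, String.toList_ofList]]
  rw [pv_strip_rstrip]
  rw [PySem.Str.strip, String.toList_ofList]

theorem pv_guard_false (P u : List Char) (h : P.isPrefixOf u = false) :
    P.isPrefixOf (PySem.Chars.rstrip u) = false := by
  by_contra hc
  rw [Bool.not_eq_false] at hc
  have hp := List.isPrefixOf_iff_prefix.mp hc
  have htr := hp.trans (pv_rstrip_prefix u)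
  rw [List.isPrefixOf_iff_prefix.mpr htr] at h
  exact Bool.true_eq_false.mp h

-- the per-line branch equality
theorem pv_perline (cs : List Char) (h : ∀ x ∈ cs, pvDomChar x = true ∧ x ≠ '\n')
    (d : PySem.Dict String String) :
    pvStepA d (String.ofList cs) =
      (match pvFieldMatch cs with
       | some kv => pvStepB d kv
       | none => d) := by
  have hisspace : ∀ x ∈ cs, PySem.Chars.isspace x = pvBlank x := by
    intro x hx
    rcases h x hx with ⟨h1, h2⟩
    unfold pvDomChar at h1
    unfold pvBlank
    have h10 : x.toNat ≠ 10 := fun hn => h2 (Char.ext (UInt32.toNat_inj.mp (by exact hn)))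
    have e1 : (x = ' ') ↔ x.toNat = 32 :=
      ⟨fun hh => by rw [hh]; rfl, fun hh => Char.ext (UInt32.toNat_inj.mp (by exact hh))⟩
    have e2 : (x = '\t') ↔ x.toNat = 9 :=
      ⟨fun hh => by rw [hh]; rfl, fun hh => Char.ext (UInt32.toNat_inj.mp (by exact hh))⟩
    have e3 : (x = '\r') ↔ x.toNat = 13 :=
      ⟨fun hh => by rw [hh]; rfl, fun hh => Char.ext (UInt32.toNat_inj.mp (by exact hh))⟩
    simp only [Bool.or_eq_true, Bool.and_eq_true, decide_eq_true_eq, beq_iff_eq] at h1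
    rw [Bool.eq_iff_iff]
    simp only [PySem.Chars.isspace, Bool.or_eq_true, Bool.and_eq_true, decide_eq_true_eq,
      beq_iff_eq]
    rw [e1, e2, e3]
    omega
  have hstrip : PySem.Chars.strip cs = PySem.Chars.rstrip (cs.dropWhile pvBlank) := by
    unfold PySem.Chars.strip PySem.Chars.lstrip
    rw [pv_dropWhile_congr_mem _ _ _ hisspace]
  have hline : PySem.Str.strip (String.ofList cs)
      = String.ofList (PySem.Chars.rstrip (cs.dropWhile pvBlank)) := by
    rw [PySem.Str.strip, String.toList_ofList, hstrip]
  have hsw : ∀ (u : List Char) (p : String),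
      PySem.Str.startswith (String.ofList u) p = p.toList.isPrefixOf u := by
    intro u p
    rw [PySem.Str.startswith_eq, String.toList_ofList, PySem.Chars.startswith]
  have hncV : ∀ c ∈ "Version".toList, c ≠ ':' := by
    intro c hc
    have := List.all_eq_true.mp
      (show ("Version".toList).all (fun c => c != ':') = true from rfl) c hc
    simpa using this
  have hncD : ∀ c ∈ "Release Date".toList, c ≠ ':' := by
    intro c hc
    have := List.all_eq_true.mp
      (show ("Release Date".toList).all (fun c => c != ':') = true from rfl) c hc
    simpa using this
  rw [pvStepA_eq, pvFieldMatch_eq, hline]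
  simp only [hsw]
  by_cases hv : "Version:".toList.isPrefixOf (cs.dropWhile pvBlank) = true
  · obtain ⟨r, hr⟩ := List.isPrefixOf_iff_prefix.mp hv
    rw [← hr]
    rw [show "Version:".toList ++ r = ("Version".toList ++ [':']) ++ r from rfl]
    rw [pv_rstrip_append "Version".toList ':' r (by decide)]
    rw [if_pos (by
      rw [show "Version:".toList = "Version".toList ++ [':'] from rfl]
      exact List.isPrefixOf_iff_prefix.mpr (List.prefix_append _ _))]
    rw [if_pos (by
      rw [show "Version:".toList = "Version".toList ++ [':'] from rfl]
      exact List.isPrefixOf_iff_prefix.mpr (List.prefix_append _ _))]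
    show d.insert "version" _ = pvStepB d ("Version", _)
    unfold pvStepB
    rw [if_pos (by rfl)]
    refine congrArg _ ?_
    rw [show (("Version".toList ++ [':']) ++ r).drop 8 = r from by
      rw [show (8 : Nat) = ("Version".toList ++ [':']).length from rfl, List.drop_left]]
    exact pv_value "Version".toList r hncV
  · have hvA : "Version:".toList.isPrefixOf
        (PySem.Chars.rstrip (cs.dropWhile pvBlank)) = false :=
      pv_guard_false _ _ (Bool.eq_false_iff.mpr hv)
    rw [if_neg (by rw [hvA]; exact Bool.false_ne_true), if_neg hv]
    by_cases hd : "Release Date:".toList.isPrefixOf (cs.dropWhile pvBlank) = true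
    · obtain ⟨r, hr⟩ := List.isPrefixOf_iff_prefix.mp hd
      rw [← hr]
      rw [show "Release Date:".toList ++ r = ("Release Date".toList ++ [':']) ++ r from rfl]
      rw [pv_rstrip_append "Release Date".toList ':' r (by decide)]
      rw [if_pos (by
        rw [show "Release Date:".toList = "Release Date".toList ++ [':'] from rfl]
        exact List.isPrefixOf_iff_prefix.mpr (List.prefix_append _ _))]
      rw [if_pos (by
        rw [show "Release Date:".toList = "Release Date".toList ++ [':'] from rfl]
        exact List.isPrefixOf_iff_prefix.mpr (List.prefix_append _ _))]
      show d.insert "date" _ = pvStepB d ("Release Date", _)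
      unfold pvStepB
      rw [if_neg (by simp)]
      refine congrArg _ ?_
      rw [show (("Release Date".toList ++ [':']) ++ r).drop 13 = r from by
        rw [show (13 : Nat) = ("Release Date".toList ++ [':']).length from rfl, List.drop_left]]
      exact pv_value "Release Date".toList r hncD
    · have hdA : "Release Date:".toList.isPrefixOf
          (PySem.Chars.rstrip (cs.dropWhile pvBlank)) = false :=
        pv_guard_false _ _ (Bool.eq_false_iff.mpr hd)
      rw [if_neg (by rw [hdA]; exact Bool.false_ne_true), if_neg hd]

-- ===== VERDICT (by name: the statement is the Claim_ definition above) =====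
theorem parse_bios_info_spec : Claim_equal_parse_bios_info := by
  intro output hdom
  unfold Spec_parse_bios_info parse_bios_info parse_bios_info_alt pvFindall
  rw [List.foldl_filterMap]
  refine congrArg PySem.Dict.items ?_
  have hsplit : (PySem.Str.split? output "\n").getD []
      = (pvLines [] output.toList).map String.ofList := by
    rw [PySem.Str.split?]
    rw [show ("\n" : String).toList = ['\n'] from rfl]
    rw [PySem.Chars.split?]
    simp [pv_splitOn_eq]
  rw [hsplit]
  apply PySem.List.foldl_congr_mem
  intro acc x hx
  rcases List.mem_map.mp hx with ⟨cs, hcs, rfl⟩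
  have hchars : ∀ c ∈ cs, pvDomChar c = true ∧ c ≠ '\n' := by
    intro c hc
    rcases pv_pvLines_mem _ _ _ hcs c hc with hmem | ⟨h1, h2⟩
    · simp at hmem
    · refine ⟨?_, h2⟩
      unfold Dom_parse_bios_info pvDomStr at hdom
      exact List.all_eq_true.mp hdom c h1
  simp only [String.toList_ofList]
  have hp := pv_perline cs hchars acc
  cases hfm : pvFieldMatch cs with
  | none => simp only [hfm] at hp ⊢; exact hp
  | some kv => simp only [hfm] at hp ⊢; exact hp
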